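-- pv_equiv track=rewrite | github.com/LaboratoryChild/CRISPR-TAPE | CRISPR_TAPE/shared_functions.py | notes
-- ===== SOURCE A (Python) =====
-- def notes(string, content):
--     """ Return key information on the generated guide RNA """
--     if string == "No 5' guide could be identified" or string == "No 3' guide could be identified":
--         return ""
--     note = []
--     for n in range(len(string)-3):
--         if string[n:n + 4] == 'TTTT': #Check for four thymines in a row
--             note.append('PolyT present.')
--     if string[0] != 'G': #Check the guide RNA starts with a 'G' at the most 5' position
--         note.append('No leading G.')
--     if content >= 75:
--         note.append('G/C content over 75%.') #Check if the G/C content of the guide is more than or equal to 75%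
--     return " ".join(note)
-- ===== SOURCE B (Python) =====
-- def notes(string, content):
--     """ Return key information on the generated guide RNA """
--     if string in ("No 5' guide could be identified", "No 3' guide could be identified"):
--         return ""
--     note = []
--     i = 0
--     n = len(string)
--     while i < n:                      # walk maximal runs of identical characters
--         j = i
--         while j < n and string[j] == string[i]:
--             j += 1
--         if string[i] == 'T' and j - i >= 4:
--             note.extend(['PolyT present.'] * (j - i - 3))   # a run of L T's holds L-3 overlapping TTTT windows
--         i = j
--     if string[0] != 'G':
--         note.append('No leading G.')
--     if content >= 75:
--         note.append('G/C content over 75%.')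
--     return " ".join(note)
-- ===== Notes on version B (the rewrite author's own statement) =====
-- stated objective: alternative
-- what changed: Replaces the sliding 4-character window scan (a fresh slice comparison at every position) with a single pass over maximal runs of identical characters, emitting L-3 PolyT notes per T-run of length L >= 4.
import Mathlib
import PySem

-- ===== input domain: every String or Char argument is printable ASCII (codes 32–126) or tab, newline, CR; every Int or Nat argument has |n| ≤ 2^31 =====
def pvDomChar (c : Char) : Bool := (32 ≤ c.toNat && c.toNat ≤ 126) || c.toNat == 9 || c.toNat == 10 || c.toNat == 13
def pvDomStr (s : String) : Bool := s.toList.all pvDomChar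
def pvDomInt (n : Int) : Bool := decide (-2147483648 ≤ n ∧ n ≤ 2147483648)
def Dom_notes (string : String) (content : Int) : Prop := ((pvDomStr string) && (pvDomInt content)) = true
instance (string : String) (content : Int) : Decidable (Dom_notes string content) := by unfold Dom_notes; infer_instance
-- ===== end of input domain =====

-- B replaces A's sliding 4-character window scan with a single pass over maximal runs of
-- identical characters (a run of L T's yields L-3 overlapping TTTT windows); same result.

-- ===== PORT A =====
def notes (string : String) (content : Int) : String :=
  if string == "No 5' guide could be identified" || string == "No 3' guide could be identified" then
    ""
  else
    let note : List String :=
      (PySem.List.pyRange 0 (PySem.Str.len string - 3) 1).foldl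
        (fun note n =>
          if PySem.Str.slice string (some n) (some (n + 4)) == "TTTT" then
            note ++ ["PolyT present."]
          else note) []
    -- string[0]: Python raises IndexError on "", excluded by Pre_notes (pyGet? = none there)
    let note := if PySem.Str.pyGet? string 0 != some 'G' then note ++ ["No leading G."] else note
    let note := if content ≥ 75 then note ++ ["G/C content over 75%."] else note
    PySem.Str.join " " note

-- ===== PORT B =====
-- Source B's outer while-loop over maximal runs: the inner while counts the run of string[i]
-- (takeWhile/dropWhile on the remaining characters), extend appends the replicated note.
def pvRunNotes : List Char → List String
  | [] => []
  | c :: rest =>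
    (if c == 'T' && 4 ≤ (rest.takeWhile (fun d => d == c)).length + 1 then
        List.replicate ((rest.takeWhile (fun d => d == c)).length + 1 - 3) "PolyT present."
      else []) ++ pvRunNotes (rest.dropWhile (fun d => d == c))
termination_by s => s.length
decreasing_by
  exact Nat.lt_succ_of_le (List.length_dropWhile_le _ _)

def notes_alt (string : String) (content : Int) : String :=
  if string == "No 5' guide could be identified" || string == "No 3' guide could be identified" then
    ""
  else
    let note : List String := pvRunNotes string.toList
    let note := if PySem.Str.pyGet? string 0 != some 'G' then note ++ ["No leading G."] else note
    let note := if content ≥ 75 then note ++ ["G/C content over 75%."] else note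
    PySem.Str.join " " note

-- ===== PRECONDITION & SPEC =====
-- Pre_ excludes only the empty string, on which A's string[0] raises IndexError
-- (the two sentinel strings are non-empty, so both early returns stay inside Pre_).
def Pre_notes (string : String) (content : Int) : Prop := string ≠ ""
instance (string : String) (content : Int) : Decidable (Pre_notes string content) := by
  unfold Pre_notes; infer_instance
def pvWitness_notes : String × Int := ("GATTTTACG", 80)

def Spec_notes (string : String) (content : Int) (out : String) : Prop := out = notes_alt string content
instance (string : String) (content : Int) (out : String) : Decidable (Spec_notes string content out) := by
  unfold Spec_notes; infer_instance

-- ===== CLAIM (what is proved, stated in full; the proofs are below) =====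
def Claim_equal_notes : Prop := ∀ (string : String) (content : Int), Dom_notes string content → Pre_notes string content → Spec_notes string content (notes string content)

-- ===== LEMMAS AND PROOFS =====

def pvW : List Char → Nat
  | [] => 0
  | c :: rest => (if (c :: rest).take 4 = ['T', 'T', 'T', 'T'] then 1 else 0) + pvW rest

theorem pvW_short (s : List Char) (h : s.length < 4) : pvW s = 0 := by
  induction s with
  | nil => rfl
  | cons c rest ih =>
    have h4 : ¬ (c :: rest).take 4 = ['T', 'T', 'T', 'T'] := by
      rw [List.take_of_length_le (by simp at h ⊢; omega)]
      intro he
      have := congrArg List.length he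
      simp at this h
      omega
    simp only [pvW]
    rw [if_neg h4, ih (by simp at h ⊢; omega)]

theorem pvW_cons_ne_T (c : Char) (hc : ¬ c = 'T') (rest : List Char) :
    pvW (c :: rest) = pvW (rest.dropWhile (fun d => d == c)) := by
  induction rest with
  | nil =>
    simp only [List.dropWhile_nil]
    exact pvW_short [c] (by simp)
  | cons d rest' ih =>
    have hhead : ¬ (c :: d :: rest').take 4 = ['T', 'T', 'T', 'T'] := by
      intro he
      apply hc
      have : (c :: d :: rest').take 4 = c :: (d :: rest').take 3 := rfl
      rw [this] at he
      exact (List.cons.injEq _ _ _ _ ▸ he).1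
    have hstep : pvW (c :: d :: rest') = pvW (d :: rest') := by
      simp only [pvW]; rw [if_neg hhead]; omega
    by_cases hd : d = c
    · subst hd
      rw [hstep, ih]
      simp [List.dropWhile_cons]
    · rw [hstep]
      simp [List.dropWhile_cons, beq_iff_eq, hd]

theorem pv_take2_iff (l : List Char) :
    2 ≤ (l.takeWhile (fun d => d == 'T')).length ↔ l.take 2 = ['T', 'T'] := by
  match l with
  | [] => simp
  | [x] => by_cases hx : x = 'T' <;> simp [List.takeWhile_cons, beq_iff_eq, hx]
  | x :: y :: tl =>
    by_cases hx : x = 'T'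
    · by_cases hy : y = 'T'
      · subst hx; subst hy
        simp [List.takeWhile_cons, beq_iff_eq]
      · simp [List.takeWhile_cons, beq_iff_eq, hx, hy]
    · simp [List.takeWhile_cons, beq_iff_eq, hx]

theorem pvW_T_run (rest : List Char) :
    pvW ('T' :: rest) =
      (if 4 ≤ (rest.takeWhile (fun d => d == 'T')).length + 1 then
        (rest.takeWhile (fun d => d == 'T')).length + 1 - 3
      else 0) + pvW (rest.dropWhile (fun d => d == 'T')) := by
  induction rest with
  | nil =>
    simp only [List.takeWhile_nil, List.dropWhile_nil]
    rw [pvW_short ['T'] (by simp)]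
    simp [pvW]
  | cons d rest' ih =>
    by_cases hd : d = 'T'
    · subst hd
      have hind : ((('T' : Char) :: 'T' :: rest').take 4 = ['T', 'T', 'T', 'T']) ↔
          rest'.take 2 = ['T', 'T'] := by
        cases rest' with
        | nil => simp
        | cons a tl => cases tl <;> simp
      have h2 := pv_take2_iff rest'
      have hW : pvW ('T' :: 'T' :: rest') =
          (if rest'.take 2 = ['T', 'T'] then 1 else 0) + pvW ('T' :: rest') := by
        simp only [pvW]
        rw [if_congr hind rfl rfl]
      rw [hW, ih]
      simp only [List.takeWhile_cons, List.dropWhile_cons, BEq.rfl, if_true]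
      by_cases h : rest'.take 2 = ['T', 'T']
      · have hlen : 2 ≤ (rest'.takeWhile (fun d => d == 'T')).length := h2.mpr h
        rw [if_pos h]
        split_ifs <;> simp_all <;> omega
      · have hlen : ¬ 2 ≤ (rest'.takeWhile (fun d => d == 'T')).length := fun hh => h (h2.mp hh)
        rw [if_neg h]
        split_ifs <;> simp_all <;> omega
    · have hind : ¬ (('T' : Char) :: d :: rest').take 4 = ['T', 'T', 'T', 'T'] := by
        intro he
        apply hd
        cases rest' <;> simp_all
      have hW : pvW ('T' :: d :: rest') = pvW (d :: rest') := by
        simp only [pvW]; rw [if_neg hind]; omega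
      rw [hW]
      simp [List.takeWhile_cons, beq_iff_eq, hd]

theorem pvRunNotes_eq (s : List Char) :
    pvRunNotes s = List.replicate (pvW s) "PolyT present." := by
  induction s using pvRunNotes.induct with
  | case1 => rw [pvRunNotes]; rfl
  | case2 c rest ih =>
    rw [pvRunNotes, ih]
    by_cases hc : c = 'T'
    · subst hc
      rw [pvW_T_run, List.replicate_add]
      congr 1
      split_ifs with h1 h2 h3 <;> simp_all
    · rw [pvW_cons_ne_T c hc rest]
      simp [beq_iff_eq, hc]

theorem pv_count_eq (s : List Char) :
    ((List.range (s.length - 3)).filter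
        (fun n => (s.drop n).take 4 == ['T', 'T', 'T', 'T'])).length = pvW s := by
  induction s with
  | nil => rfl
  | cons c rest ih =>
    by_cases h : rest.length ≤ 2
    · have h0 : (c :: rest).length - 3 = 0 := by simp; omega
      rw [h0, pvW_short _ (by simp; omega)]
      rfl
    · have hs : (c :: rest).length - 3 = (rest.length - 3) + 1 := by simp; omega
      rw [hs, List.range_succ_eq_map, List.filter_cons]
      simp only [List.filter_map, Function.comp_def, List.drop_succ_cons, List.drop_zero]
      simp only [pvW]
      by_cases hp : (c :: rest).take 4 = ['T', 'T', 'T', 'T']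
      · rw [if_pos (by simp [hp] : ((c :: rest).take 4 == ['T', 'T', 'T', 'T']) = true), if_pos hp]
        simp [ih]
        omega
      · rw [if_neg (by simp only [beq_iff_eq]; exact hp : ¬ ((c :: rest).take 4 == ['T', 'T', 'T', 'T']) = true), if_neg hp]
        simp [ih]

theorem pv_string_beq (a b : String) : (a == b) = (a.toList == b.toList) := by
  rw [Bool.eq_iff_iff]
  simp [beq_iff_eq, String.toList_inj]

theorem pv_pyRange_sub3 (L : Nat) :
    PySem.List.pyRange 0 ((L : Int) - 3) 1 = List.map (fun k : Nat => (k : Int)) (List.range (L - 3)) := by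
  by_cases h : 3 ≤ L
  · have : (L : Int) - 3 = ((L - 3 : Nat) : Int) := by omega
    rw [this, PySem.List.pyRange_zero_natCast]
  · rw [PySem.List.pyRange_one_eq_nil (by push_cast; omega)]
    have : L - 3 = 0 := by omega
    rw [this]
    rfl

theorem pvA_fold_eq (s : String) :
    (PySem.List.pyRange 0 (PySem.Str.len s - 3) 1).foldl
        (fun note n =>
          if PySem.Str.slice s (some n) (some (n + 4)) == "TTTT" then
            note ++ ["PolyT present."]
          else note) [] = pvRunNotes s.toList := by
  rw [PySem.List.foldl_append_if (fun n => PySem.Str.slice s (some n) (some (n + 4)) == "TTTT")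
    (fun _ => "PolyT present.")]
  rw [List.nil_append]
  rw [pvRunNotes_eq]
  rw [show PySem.Str.len s = ((s.toList.length : Nat) : Int) from by simp [PySem.Str.len_eq]]
  rw [pv_pyRange_sub3]
  rw [List.filter_map]
  have hpred : ∀ n : Nat,
      ((fun n => PySem.Str.slice s (some n) (some (n + 4)) == "TTTT") ∘ (fun k : Nat => (k : Int))) n
        = ((s.toList.drop n).take 4 == ['T', 'T', 'T', 'T']) := by
    intro n
    simp only [Function.comp_def]
    rw [pv_string_beq]
    have h4 : ((n : Int) + 4) = ((n + 4 : Nat) : Int) := by push_cast; ring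
    rw [h4]
    have : (PySem.Str.slice s (some (n : Int)) (some ((n + 4 : Nat) : Int))).toList
        = (s.toList.drop n).take 4 := by
      rw [PySem.Str.toList_slice]
      show PySem.List.slice s.toList (some ((n : Nat) : Int)) (some ((n + 4 : Nat) : Int)) = _
      rw [PySem.List.slice_natCast]
      congr 1
      omega
    rw [this]
    rfl
  rw [List.filter_congr (fun n _ => hpred n)]
  rw [List.map_map]
  rw [show ((fun _ : Int => "PolyT present.") ∘ (fun k : Nat => (k : Int))) = (fun _ : Nat => "PolyT present.") from rfl]
  rw [List.map_const', pv_count_eq]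

-- ===== VERDICT (by name: the statement is the Claim_ definition above) =====
theorem notes_spec : Claim_equal_notes := by
  intro string content _ _
  unfold Spec_notes notes notes_alt
  rw [pvA_fold_eq]
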